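-- pv_equiv track=rewrite | github.com/Kharlap-Sergey/PythonLab25 | maintask2/maintask2.py | decryptPermutation
-- ===== SOURCE A (Python) =====
-- def decryptPermutation(text):
--     ans = ""
--     word = ""
--     counter = 3
--     for i in text:
--         if i != ' ':
--             word += i
--         else:
--             first_half = word[-counter%len(word):]
--             second_half = word[:-counter%len(word)]
--             ans += first_half + second_half + " "
--             if '.' in word:
--                 counter += 1
--                 ans += '\n'
--             word = ""
--
--     return ans;
-- ===== SOURCE B (Python) =====
-- def decryptPermutation(text):
--     parts = text.split(' ')
--     counter = 3
--     pieces = []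
--     for word in parts[:-1]:
--         k = -counter % len(word)
--         pieces.append(word[k:] + word[:k] + ' ')
--         if '.' in word:
--             counter += 1
--             pieces.append('\n')
--     return ''.join(pieces)
-- ===== Notes on version B (the rewrite author's own statement) =====
-- stated objective: idiomatic
-- what changed: A builds each word character by character inside one foldl over the text with an (ans, word, counter) state and grows ans by string concatenation; B instead splits the text on ' ', rotates each segment before the last by -counter % len(word), and joins the collected pieces once.
-- outside the precondition, e.g. on decryptPermutation(' '): A raises ZeroDivisionError, B raises ZeroDivisionError
import Mathlib
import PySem

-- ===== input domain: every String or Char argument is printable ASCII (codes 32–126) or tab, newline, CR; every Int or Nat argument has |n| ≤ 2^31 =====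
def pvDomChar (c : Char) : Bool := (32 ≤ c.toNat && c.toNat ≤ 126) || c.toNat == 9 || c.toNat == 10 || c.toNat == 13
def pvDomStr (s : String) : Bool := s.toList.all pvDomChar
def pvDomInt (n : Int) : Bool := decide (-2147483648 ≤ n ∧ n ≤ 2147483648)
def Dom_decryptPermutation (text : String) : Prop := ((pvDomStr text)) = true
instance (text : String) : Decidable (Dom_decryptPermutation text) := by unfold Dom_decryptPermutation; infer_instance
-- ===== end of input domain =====

-- B replaces A's character-by-character accumulator loop by split(' ')/rotate-each-word/join (idiomatic decomposition; measured faster in a timing run).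

-- ===== PORT A =====
-- A's loop body: state = (ans, word, counter)
def pvStepA (st : List Char × List Char × Int) (i : Char) : List Char × List Char × Int :=
  if i ≠ ' ' then (st.1, st.2.1 ++ [i], st.2.2)
  else
    let word := st.2.1
    let counter := st.2.2
    let first_half := PySem.List.slice word (some (PySem.Int.mod (-counter) (word.length : Int))) none
    let second_half := PySem.List.slice word none (some (PySem.Int.mod (-counter) (word.length : Int)))
    let ans := st.1 ++ first_half ++ second_half ++ [' ']
    if PySem.Chars.isIn ['.'] word then (ans ++ ['\n'], [], counter + 1)
    else (ans, [], counter)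

def decryptPermutation (text : String) : String :=
  String.ofList (text.toList.foldl pvStepA ([], [], 3)).1

-- ===== PORT B =====
-- B's loop body: state = (pieces, counter)
def pvStepB (st : List (List Char) × Int) (word : List Char) : List (List Char) × Int :=
  let k := PySem.Int.mod (-st.2) (word.length : Int)
  let pieces := st.1 ++ [PySem.List.slice word (some k) none ++ PySem.List.slice word none (some k) ++ [' ']]
  if PySem.Chars.isIn ['.'] word then (pieces ++ [['\n']], st.2 + 1) else (pieces, st.2)

def decryptPermutation_alt (text : String) : String :=
  String.ofList (PySem.Chars.join []
    (((PySem.List.slice (text.toList.splitOn ' ') none (some (-1))).foldl pvStepB ([], 3)).1))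

-- ===== PRECONDITION & SPEC =====
-- Pre_ excludes exactly the inputs on which the Python A raises ZeroDivisionError (an empty
-- segment before some space: a leading space or two consecutive spaces); B raises there too.
def Pre_decryptPermutation (text : String) : Prop :=
  ∀ w ∈ (text.toList.splitOn ' ').dropLast, w ≠ []
instance (text : String) : Decidable (Pre_decryptPermutation text) := by unfold Pre_decryptPermutation; infer_instance

def pvWitness_decryptPermutation : String := "abc. de f"

def Spec_decryptPermutation (text : String) (out : String) : Prop := out = decryptPermutation_alt text
instance (text : String) (out : String) : Decidable (Spec_decryptPermutation text out) := by unfold Spec_decryptPermutation; infer_instance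

-- ===== CLAIM (what is proved, stated in full; the proofs are below) =====
def Claim_equal_decryptPermutation : Prop := ∀ (text : String), Dom_decryptPermutation text → Pre_decryptPermutation text → Spec_decryptPermutation text (decryptPermutation text)

-- ===== LEMMAS AND PROOFS =====

theorem pvJoinNil (ls : List (List Char)) : PySem.Chars.join [] ls = ls.flatten := by
  induction ls with
  | nil => rfl
  | cons x t ih =>
      simp only [PySem.Chars.join, List.intercalate] at ih ⊢
      cases t <;> simp_all

theorem pvGetLastD_irrel {α : Type} (l : List α) (h : l ≠ []) (d d' : α) :
    l.getLastD d = l.getLastD d' := by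
  cases l with
  | nil => exact absurd rfl h
  | cons a t => rw [List.getLastD_cons, List.getLastD_cons]

-- pulling the pieces accumulator out of B's fold
theorem pvStepB_acc (ws : List (List Char)) : ∀ (p : List (List Char) × Int),
    ws.foldl pvStepB p =
      (p.1 ++ (ws.foldl pvStepB ([], p.2)).1, (ws.foldl pvStepB ([], p.2)).2) := by
  induction ws with
  | nil => intro p; simp
  | cons w t ih =>
      intro p
      have hstep : ∀ (q : List (List Char) × Int), pvStepB q w =
          (q.1 ++ (pvStepB ([], q.2) w).1, (pvStepB ([], q.2) w).2) := by
        intro q; simp only [pvStepB]; split <;> simp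
      rw [List.foldl_cons, List.foldl_cons, ih (pvStepB p w), ih (pvStepB ([], p.2) w),
        hstep p, hstep ([], p.2)]
      simp [List.append_assoc]

-- the main invariant: A's character fold computes B's word fold over splitOn
theorem pvMain (cs : List Char) : ∀ (ans word : List Char) (c : Int), ' ' ∉ word →
    cs.foldl pvStepA (ans, word, c) =
      (ans ++ (((word ++ cs).splitOn ' ').dropLast.foldl pvStepB ([], c)).1.flatten,
       ((word ++ cs).splitOn ' ').getLastD [],
       (((word ++ cs).splitOn ' ').dropLast.foldl pvStepB ([], c)).2) := by
  induction cs with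
  | nil =>
      intro ans word c hw
      have hs : word.splitOn ' ' = [word] := by
        simp only [List.splitOn]
        refine List.splitOnP_eq_single _ _ ?_
        intro x hx
        simp only [beq_iff_eq]
        exact fun h => hw (h ▸ hx)
      rw [List.append_nil]
      simp [hs]
  | cons i cs' ih =>
      intro ans word c hw
      by_cases hi : i = ' '
      · subst hi
        have hsplit : (word ++ ' ' :: cs').splitOn ' ' = word :: cs'.splitOn ' ' := by
          simp only [List.splitOn]
          refine List.splitOnP_first _ _ ?_ _ (by simp) _
          intro x hx
          simp only [beq_iff_eq]
          exact fun h => hw (h ▸ hx)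
        have hne : cs'.splitOn ' ' ≠ [] := List.splitOnP_ne_nil _ _
        rcases hws : cs'.splitOn ' ' with _ | ⟨w0, t⟩
        · exact absurd hws hne
        have hdrop : ((word ++ ' ' :: cs').splitOn ' ').dropLast = word :: (w0 :: t).dropLast := by
          rw [hsplit, hws]; rfl
        have hA : pvStepA (ans, word, c) ' ' =
            (ans ++ (pvStepB ([], c) word).1.flatten, [],
             (pvStepB ([], c) word).2) := by
          simp only [pvStepA, pvStepB, if_neg (by simp : ¬ (' ' ≠ ' '))]
          split <;> simp
        rw [List.foldl_cons, hA, ih (ans ++ (pvStepB ([], c) word).1.flatten) [] (pvStepB ([], c) word).2 (by simp)]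
        simp only [List.nil_append, hsplit, hws, List.dropLast_cons₂]
        rw [List.foldl_cons, pvStepB_acc _ (pvStepB ([], c) word)]
        refine Prod.ext (by simp) (Prod.ext ?_ rfl)
        show (w0 :: t).getLastD [] = (word :: w0 :: t).getLastD []
        rw [show (word :: w0 :: t).getLastD [] = (w0 :: t).getLastD word from List.getLastD_cons]
        exact pvGetLastD_irrel (w0 :: t) (List.cons_ne_nil w0 t) [] word
      · have hA : pvStepA (ans, word, c) i = (ans, word ++ [i], c) := by
          simp only [pvStepA, if_pos hi]
        have hw' : ' ' ∉ word ++ [i] := by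
          intro h
          rcases List.mem_append.mp h with h | h
          · exact hw h
          · have h2 : ' ' = i := by simpa using h
            exact hi h2.symm
        rw [List.foldl_cons, hA, ih ans (word ++ [i]) c hw']
        simp

-- ===== VERDICT (by name: the statement is the Claim_ definition above) =====
theorem decryptPermutation_spec : Claim_equal_decryptPermutation := by
  unfold Claim_equal_decryptPermutation
  intro text _ _
  unfold Spec_decryptPermutation decryptPermutation decryptPermutation_alt
  rw [pvMain text.toList [] [] 3 (by simp), PySem.List.slice_to_neg_one, pvJoinNil]
  simp
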